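-- pv_equiv track=rewrite | github.com/sshatrov/training_python_base | lesson4.py | unique_letter
-- ===== SOURCE A (Python) =====
-- def unique_letter(names_list_input):
--     names_list_trimmed = list(map (lambda name: name[0],names_list_input))
--     letters_dict = dict()
--     for letter in names_list_trimmed:
--         if letter in letters_dict:
--             letters_dict[letter]+=1
--         else:
--             letters_dict[letter]=1
--     letters_dict_sorted = list (letters_dict.items())
--     letters_dict_sorted.sort(key = lambda letter: letter[1])
--     return (letters_dict_sorted[0][0])
-- ===== SOURCE B (Python) =====
-- def unique_letter(names_list_input):
--     first_letters = list(map(lambda name: name[0], names_list_input))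
--     best = first_letters[0]
--     for letter in first_letters:
--         if first_letters.count(letter) < first_letters.count(best):
--             best = letter
--     return best
-- ===== Notes on version B (the rewrite author's own statement) =====
-- stated objective: simpler
-- what changed: Dropped the counting dict and the stable sort: B takes the list of first letters and does one argmin scan with strict < on repeated .count, which preserves A's first-appearance tie-break.
import Mathlib
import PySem

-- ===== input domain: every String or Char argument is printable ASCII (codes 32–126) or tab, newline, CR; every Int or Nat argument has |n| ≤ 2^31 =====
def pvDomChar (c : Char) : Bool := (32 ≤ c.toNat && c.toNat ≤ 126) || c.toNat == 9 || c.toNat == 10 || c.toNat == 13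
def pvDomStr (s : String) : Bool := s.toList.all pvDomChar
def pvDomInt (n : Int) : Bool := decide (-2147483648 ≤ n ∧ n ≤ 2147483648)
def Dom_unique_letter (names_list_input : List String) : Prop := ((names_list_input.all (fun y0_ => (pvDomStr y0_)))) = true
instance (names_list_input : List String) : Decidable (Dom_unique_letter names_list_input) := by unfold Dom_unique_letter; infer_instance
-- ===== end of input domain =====

-- B replaces A's counting dict + stable sort by a single argmin scan (strict <, repeated .count); simpler, same return value.

-- ===== PORT A =====
def unique_letter (names_list_input : List String) : String :=
  let names_list_trimmed := names_list_input.map (fun name => (PySem.Str.pyGet? name 0).getD ' ')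
  let letters_dict := names_list_trimmed.foldl
    (fun d letter => if d.contains letter then d.modify letter 0 (· + 1) else d.insert letter (1 : Int))
    PySem.Dict.empty
  let letters_dict_sorted := PySem.List.sorted letters_dict.items (fun letter => letter.2)
  match PySem.List.pyGet? letters_dict_sorted 0 with
  | some p => String.ofList [p.1]
  | none => ""   -- IndexError ([0] on an empty list), excluded by Pre_

-- ===== PORT B =====
def unique_letter_alt (names_list_input : List String) : String :=
  let first_letters := names_list_input.map (fun name => (PySem.Str.pyGet? name 0).getD ' ')
  match first_letters with
  | [] => ""   -- first_letters[0] raises IndexError, excluded by Pre_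
  | b :: _ =>
    String.ofList [first_letters.foldl
      (fun best letter => if first_letters.count letter < first_letters.count best then letter else best) b]

-- ===== PRECONDITION & SPEC =====
-- Pre_ excludes exactly the inputs where the Python A raises IndexError: the empty list and lists containing an empty string.
def Pre_unique_letter (names_list_input : List String) : Prop :=
  names_list_input ≠ [] ∧ ∀ name ∈ names_list_input, name ≠ ""
instance (names_list_input : List String) : Decidable (Pre_unique_letter names_list_input) := by
  unfold Pre_unique_letter; infer_instance
def pvWitness_unique_letter : List String := (["anna", "bob", "ann"])

def Spec_unique_letter (names_list_input : List String) (out : String) : Prop := out = unique_letter_alt names_list_input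
instance (names_list_input : List String) (out : String) : Decidable (Spec_unique_letter names_list_input out) := by unfold Spec_unique_letter; infer_instance

-- ===== CLAIM (what is proved, stated in full; the proofs are below) =====
def Claim_equal_unique_letter : Prop := ∀ (names_list_input : List String), Dom_unique_letter names_list_input → Pre_unique_letter names_list_input → Spec_unique_letter names_list_input (unique_letter names_list_input)

-- ===== LEMMAS AND PROOFS =====

-- one step of Python's first-minimum scan, on an optional running best
def pvMStep {α κ : Type} [LinearOrder κ] (key : α → κ) (acc : Option α) (x : α) : Option α :=
  match acc with
  | none => some x
  | some m => if key x < key m then some x else some m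

theorem pvFoldlSome {α κ : Type} [LinearOrder κ] (key : α → κ) (xs : List α) (b : α) :
    List.foldl (pvMStep key) (some b) xs
      = some (xs.foldl (fun best l => if key l < key best then l else best) b) := by
  induction xs generalizing b with
  | nil => rfl
  | cons x t ih =>
      simp only [List.foldl_cons]
      have : pvMStep key (some b) x = some (if key x < key b then x else b) := by
        simp only [pvMStep]; split <;> simp_all
      rw [this, ih]

theorem pvHeadInsertBy {α κ : Type} [LinearOrder κ] (key : α → κ) (x : α) (acc : List α) :
    (PySem.List.insertBy (fun a b => decide (key a < key b)) x acc).head? = pvMStep key acc.head? x := by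
  cases acc with
  | nil => rfl
  | cons y ys =>
      simp only [PySem.List.insertBy, pvMStep, List.head?]
      by_cases h : key x < key y <;> simp [h]

theorem pvHeadFoldlInsertBy {α κ : Type} [LinearOrder κ] (key : α → κ) (xs : List α) (acc : List α) :
    (List.foldl (fun acc x => PySem.List.insertBy (fun a b => decide (key a < key b)) x acc) acc xs).head?
      = List.foldl (pvMStep key) acc.head? xs := by
  induction xs generalizing acc with
  | nil => rfl
  | cons x t ih =>
      simp only [List.foldl_cons]
      rw [ih, pvHeadInsertBy]

theorem pvHeadSorted {α κ : Type} [LinearOrder κ] (key : α → κ) (xs : List α) :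
    (PySem.List.sorted xs key).head? = List.foldl (pvMStep key) none xs := by
  rw [PySem.List.sorted_eq_foldl_insertBy]
  exact pvHeadFoldlInsertBy key xs []

theorem pvMStepMap {α β κ : Type} [LinearOrder κ] (key : β → κ) (f : α → β) (xs : List α) (acc : Option α) :
    List.foldl (pvMStep key) (acc.map f) (xs.map f)
      = (List.foldl (pvMStep (fun a => key (f a))) acc xs).map f := by
  induction xs generalizing acc with
  | nil => rfl
  | cons x t ih =>
      simp only [List.map_cons, List.foldl_cons]
      have : pvMStep key (acc.map f) (f x) = (pvMStep (fun a => key (f a)) acc x).map f := by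
        cases acc with
        | none => rfl
        | some m => simp only [pvMStep, Option.map_some]; split <;> simp
      rw [this, ih]

theorem pvMStepCongr {α κ κ' : Type} [LinearOrder κ] [LinearOrder κ'] (key1 : α → κ) (key2 : α → κ')
    (h : ∀ a b, key1 a < key1 b ↔ key2 a < key2 b) (xs : List α) (acc : Option α) :
    List.foldl (pvMStep key1) acc xs = List.foldl (pvMStep key2) acc xs := by
  induction xs generalizing acc with
  | nil => rfl
  | cons x t ih =>
      simp only [List.foldl_cons]
      have : pvMStep key1 acc x = pvMStep key2 acc x := by
        cases acc with
        | none => rfl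
        | some m => simp only [pvMStep, h x m]
      rw [this, ih]

-- ordered dedup, carrying the already-seen prefix
def pvDedupR {α : Type} [BEq α] (seen : List α) : List α → List α
  | [] => []
  | x :: L => if seen.contains x then pvDedupR seen L else x :: pvDedupR (seen ++ [x]) L

theorem pvOfListEq {α : Type} [BEq α] (L : List α) : ∀ (seen : List α),
    List.foldl PySem.Set.add seen L = seen ++ pvDedupR seen L := by
  induction L with
  | nil => intro seen; simp [pvDedupR]
  | cons x t ih =>
      intro seen
      simp only [List.foldl_cons, pvDedupR, PySem.Set.add]
      by_cases h : seen.contains x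
      · simp [h, PySem.Set.contains, ih]
      · simp [h, PySem.Set.contains, ih]

theorem pvFoldDedup {α κ : Type} [BEq α] [LawfulBEq α] [LinearOrder κ] (key : α → κ) (L : List α) :
    ∀ (seen : List α) (acc : Option α),
    (∀ x ∈ seen, ∃ m, acc = some m ∧ key m ≤ key x) →
    List.foldl (pvMStep key) acc (pvDedupR seen L) = List.foldl (pvMStep key) acc L := by
  induction L with
  | nil => intro seen acc _; rfl
  | cons x t ih =>
      intro seen acc h
      simp only [pvDedupR]
      by_cases hx : seen.contains x
      · simp only [hx, if_true, List.foldl_cons]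
        obtain ⟨m, hm, hle⟩ := h x (by simpa using hx)
        have hstep : pvMStep key acc x = acc := by
          subst hm; simp only [pvMStep, if_neg (not_lt.mpr hle)]
        rw [hstep]
        exact ih seen acc h
      · simp only [hx, List.foldl_cons]
        apply ih
        intro y hy
        rcases List.mem_append.mp hy with hy | hy
        · obtain ⟨m, hm, hle⟩ := h y hy
          subst hm
          simp only [pvMStep]
          split
          · exact ⟨x, rfl, le_trans (le_of_lt (by assumption)) hle⟩
          · exact ⟨m, rfl, hle⟩
        · have : y = x := by simpa using hy
          subst this
          cases acc with
          | none => exact ⟨y, rfl, le_refl _⟩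
          | some m =>
              simp only [pvMStep]
              split
              · exact ⟨y, rfl, le_refl _⟩
              · exact ⟨m, rfl, not_lt.mp (by assumption)⟩

theorem pvFoldOfList {α κ : Type} [BEq α] [LawfulBEq α] [LinearOrder κ] (key : α → κ) (L : List α) :
    List.foldl (pvMStep key) none (PySem.Set.ofList L) = List.foldl (pvMStep key) none L := by
  have h1 : PySem.Set.ofList L = pvDedupR ([] : List α) L := by
    simpa using pvOfListEq L []
  rw [h1]
  exact pvFoldDedup key L [] none (by intro x hx; simp at hx)

theorem pvDictEqCounter (L : List Char) :
    L.foldl (fun d letter => if d.contains letter then d.modify letter 0 (· + 1) else d.insert letter (1 : Int))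
      PySem.Dict.empty = PySem.Dict.counter L := by
  rw [PySem.Dict.counter_eq_foldl]
  induction L using List.reverseRecOn with
  | nil => rfl
  | append_singleton t x ih =>
      rw [List.foldl_append, List.foldl_append, ih]
      simp only [List.foldl_cons, List.foldl_nil]
      split_ifs with h
      · rfl
      · simp only [PySem.Dict.modify]
        rw [PySem.Dict.getD_of_not_contains _ _ (by simpa using h)]
        norm_num

theorem pvPyGetZero {α : Type} (xs : List α) : PySem.List.pyGet? xs 0 = xs.head? := by
  cases xs <;> simp [PySem.List.pyGet?, PySem.List.pyIdx?]

theorem pvConsCase (b : Char) (t : List Char) :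
    (match PySem.List.pyGet?
        (PySem.List.sorted
          ((b :: t).foldl
            (fun d letter => if d.contains letter then d.modify letter 0 (· + 1) else d.insert letter (1 : Int))
            PySem.Dict.empty).items
          (fun letter => letter.2)) 0 with
      | some p => String.ofList [p.1]
      | none => "")
    = String.ofList [(b :: t).foldl
        (fun best letter => if List.count letter (b :: t) < List.count best (b :: t) then letter else best) b] := by
  rw [pvDictEqCounter, pvPyGetZero, pvHeadSorted, PySem.Dict.items_counter]
  have hmap := pvMStepMap (fun p : Char × Int => p.2)
    (fun k => (k, (List.count k (b :: t) : Int))) (PySem.Set.ofList (b :: t)) none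
  simp only [Option.map_none] at hmap
  rw [hmap]
  rw [pvMStepCongr (fun k => ((List.count k (b :: t) : Int))) (fun k => List.count k (b :: t))
    (by intro a c; exact Int.ofNat_lt) (PySem.Set.ofList (b :: t)) none]
  rw [pvFoldOfList]
  have hfold : List.foldl (pvMStep (fun k => List.count k (b :: t))) none (b :: t)
      = some (t.foldl (fun best l => if List.count l (b :: t) < List.count best (b :: t) then l else best) b) := by
    simp only [List.foldl_cons]
    have h0 : pvMStep (fun k => List.count k (b :: t)) none b = some b := rfl
    rw [h0, pvFoldlSome]
  rw [hfold]
  simp only [List.foldl_cons, if_neg (lt_irrefl (List.count b (b :: t))), Option.map_some]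

-- ===== VERDICT (by name: the statement is the Claim_ definition above) =====
theorem unique_letter_spec : Claim_equal_unique_letter := by
  intro names _ _
  unfold Spec_unique_letter unique_letter unique_letter_alt
  cases names with
  | nil => rfl
  | cons n rest =>
      simp only [List.map_cons]
      exact pvConsCase _ _
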